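-- pv_equiv track=rewrite | github.com/randal-cox/quizzinator | lib/quizzinator/utils.py | ngram_repeat
-- ===== SOURCE A (Python) =====
-- from collections import Counter
--
-- def ngram_repeat(text: str, L: int = 30, K: int = 2) -> dict[str,int]:
--     """
--     Returns the worst offender string and its count
--     """
--     counts = Counter(text[i:i+L] for i in range(len(text)-L+1))
--     ret =  {s:c for s,c in counts.items() if c >= K}
--     ret = sorted(
--         ret.items(),
--         key=lambda item: item[1],      # sort by the count
--         reverse=True                   # highest counts first
--     )
--     ret = [
--         (s, cnt)
--         for s, cnt in ret
--         if len(set(s)) > 3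
--     ] or [
--         ['', 0]
--     ]
--
--     return ret[0]
-- ===== SOURCE B (Python) =====
-- def ngram_repeat(text: str, L: int = 30, K: int = 2):
--     subs = [text[i:i+L] for i in range(len(text)-L+1)]
--     best = ('', 0)
--     i = 0
--     for s in subs:
--         if subs.index(s) == i:          # only the first occurrence is a candidate
--             c = subs.count(s)
--             if c >= K and c > best[1] and len(set(s)) > 3:
--                 best = (s, c)
--         i += 1
--     return best
-- ===== Notes on version B (the rewrite author's own statement) =====
-- stated objective: simpler
-- what changed: B drops A's Counter dict and the sort-descending-then-filter pipeline entirely: it scans the substring list once, treats position i as a candidate only when it is the first occurrence (subs.index(s) == i), counts that substring directly with subs.count, and keeps the best qualifying (s, c) with a strict '>' so ties resolve to the earliest first appearance, exactly A's tie-break.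
import Mathlib
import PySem

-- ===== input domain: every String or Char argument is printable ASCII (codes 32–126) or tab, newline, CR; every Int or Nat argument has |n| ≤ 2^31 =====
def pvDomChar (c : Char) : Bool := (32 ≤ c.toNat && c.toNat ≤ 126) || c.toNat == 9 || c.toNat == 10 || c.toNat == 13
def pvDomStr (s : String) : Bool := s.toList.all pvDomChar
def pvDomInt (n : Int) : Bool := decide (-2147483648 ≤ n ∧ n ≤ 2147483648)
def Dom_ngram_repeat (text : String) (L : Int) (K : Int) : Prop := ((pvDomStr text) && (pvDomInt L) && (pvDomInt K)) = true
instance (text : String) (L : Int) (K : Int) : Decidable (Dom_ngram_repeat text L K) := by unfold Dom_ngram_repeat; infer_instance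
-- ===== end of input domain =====

-- B drops A's Counter and sort pipeline: one scan over the substring list, considering each
-- first occurrence (index(s) == i) with its direct count, keeping the strictly best. Objective: simpler.

-- ===== PORT A =====
-- counts = Counter(text[i:i+L] for i in range(len(text)-L+1))
-- ret = {s:c for s,c in counts.items() if c >= K}    (counter keys are distinct, so this dict's
--   items are exactly the filtered item list, in order)
-- ret = sorted(ret.items(), key=item[1], reverse=True); keep len(set(s)) > 3, else the default entry; return ret[0]
def ngram_repeat (text : String) (L : Int) (K : Int) : String × Int :=
  let subs := (PySem.List.pyRange 0 (PySem.Str.len text - L + 1) 1).map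
      (fun i => PySem.Str.slice text (some i) (some (i + L)))
  let counts := PySem.Dict.counter subs
  let ret1 := counts.items.filter (fun p => decide (K ≤ p.2))
  let ret2 := PySem.List.sorted ret1 (fun p => p.2) true
  let ret3 := ret2.filter (fun p => decide ((3 : Int) < PySem.Set.len (PySem.Set.ofList p.1.toList)))
  ret3.headD ("", 0)

-- ===== PORT B =====
-- subs = [text[i:i+L] for i in range(len(text)-L+1)]; best = ('', 0); i = 0
-- for s in subs: if subs.index(s) == i: c = subs.count(s);
--   if c >= K and c > best[1] and len(set(s)) > 3: best = (s, c)
--   i += 1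
-- return best
def ngram_repeat_alt (text : String) (L : Int) (K : Int) : String × Int :=
  let subs := (PySem.List.pyRange 0 (PySem.Str.len text - L + 1) 1).map
      (fun i => PySem.Str.slice text (some i) (some (i + L)))
  (subs.foldl
    (fun st s =>
      ( if PySem.List.index? subs s = some st.2.toNat then
          let c : Int := (PySem.List.count subs s : Int)
          if decide (K ≤ c) && decide (st.1.2 < c)
              && decide ((3 : Int) < PySem.Set.len (PySem.Set.ofList s.toList))
            then (s, c) else st.1
        else st.1,
        st.2 + 1))
    (("", 0), (0 : Int))).1

-- ===== PRECONDITION & SPEC =====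
def Spec_ngram_repeat (text : String) (L : Int) (K : Int) (out : String × Int) : Prop := out = ngram_repeat_alt text L K
instance (text : String) (L : Int) (K : Int) (out : String × Int) : Decidable (Spec_ngram_repeat text L K out) := by unfold Spec_ngram_repeat; infer_instance

-- ===== CLAIM (what is proved, stated in full; the proofs are below) =====
def Claim_equal_ngram_repeat : Prop := ∀ (text : String) (L : Int) (K : Int), Dom_ngram_repeat text L K → Spec_ngram_repeat text L K (ngram_repeat text L K)

-- ===== LEMMAS AND PROOFS =====

-- dropping an element the filter rejects does not change the filtered list, wherever it was inserted
lemma filter_insertBy_of_neg {α : Type} (q : α → Bool) (b : α → α → Bool) (x : α)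
    (hx : q x ≠ true) : ∀ (s : List α),
    (PySem.List.insertBy b x s).filter q = s.filter q := by
  intro s
  induction s with
  | nil => simp [PySem.List.insertBy, hx]
  | cons y ys ih =>
      by_cases hb : b x y
      · simp [PySem.List.insertBy, hb, hx]
      · simp only [PySem.List.insertBy, hb]
        by_cases hy : q y <;> simp [List.filter, hy, ih]

-- head of the q-filtered list after a stable descending insert = max-scan step
lemma headD_filter_insertBy (q : String × Int → Bool) (x : String × Int) :
    ∀ (s : List (String × Int)) (d : String × Int),
    s.Pairwise (fun a c => c.2 ≤ a.2) → q x = true → d.2 < x.2 →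
    ((PySem.List.insertBy (fun a c => decide (c.2 < a.2)) x s).filter q).headD d
      = if ((s.filter q).headD d).2 < x.2 then x else (s.filter q).headD d := by
  intro s
  induction s with
  | nil => intro d _ hx hd; simp [PySem.List.insertBy, hx, hd]
  | cons y ys ih =>
      intro d hp hx hd
      rcases List.pairwise_cons.mp hp with ⟨hy_ge, hp'⟩
      by_cases hb : y.2 < x.2
      · -- x goes in front; the old best is below x.2
        have hbest : (((y :: ys).filter q).headD d).2 < x.2 := by
          rcases hh : ((y :: ys).filter q) with _ | ⟨h, t⟩
          · simpa [hh] using hd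
          · have hmem : h ∈ (y :: ys).filter q := by rw [hh]; exact List.mem_cons_self
            have hmem' : h ∈ y :: ys := List.mem_of_mem_filter hmem
            rcases List.mem_cons.mp hmem' with rfl | hmem''
            · simpa [hh] using hb
            · have := hy_ge h hmem''
              simp only [List.headD_cons]
              omega
        rw [show PySem.List.insertBy (fun a c => decide (c.2 < a.2)) x (y :: ys) = x :: y :: ys
              from by simp [PySem.List.insertBy, hb]]
        rw [List.filter_cons_of_pos hx, List.headD_cons, if_pos hbest]
      · -- x goes below y
        simp only [PySem.List.insertBy, decide_eq_true_eq, hb, if_false]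
        by_cases hy : q y
        · have : ¬ (y.2 < x.2) := hb
          simp [List.filter, hy, this]
        · simp only [List.filter, hy]
          exact ih d hp' hx hd

-- A's sort-filter-head equals a one-pass best-so-far scan over the same item list,
-- for any tests q1, q2, provided d's count is below every count that can win
lemma headD_sorted_eq_foldl (q1 q2 : String × Int → Bool) :
    ∀ (l : List (String × Int)) (d : String × Int),
    (∀ x ∈ l, q1 x = true → q2 x = true → d.2 < x.2) →
    ((PySem.List.sorted (l.filter q1) (fun p => p.2) true).filter q2).headD d
      = l.foldl (fun best p => if q1 p && decide (best.2 < p.2) && q2 p then p else best) d := by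
  intro l
  induction l using List.reverseRecOn with
  | nil => intro d _; simp [PySem.List.sorted]
  | append_singleton l' x ih =>
      intro d hd
      have hd' : ∀ y ∈ l', q1 y = true → q2 y = true → d.2 < y.2 := by
        intro y hy; exact hd y (List.mem_append_left _ hy)
      have hins : PySem.List.sorted ((l' ++ [x]).filter q1) (fun p => p.2) true
          = if q1 x
            then PySem.List.insertBy (fun a c => decide (c.2 < a.2)) x
                   (PySem.List.sorted (l'.filter q1) (fun p => p.2) true)
            else PySem.List.sorted (l'.filter q1) (fun p => p.2) true := by
        rw [PySem.List.sorted_rev_eq_foldl_insertBy, PySem.List.sorted_rev_eq_foldl_insertBy,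
            List.filter_append]
        by_cases h1 : q1 x <;> simp [h1, List.foldl_append]
      rw [List.foldl_append, ← ih d hd', hins]
      set s := PySem.List.sorted (l'.filter q1) (fun p => p.2) true with hs
      have hpair : s.Pairwise (fun a c => c.2 ≤ a.2) :=
        PySem.List.sorted_pairwise_rev (l'.filter q1) (fun p => p.2)
      by_cases h1 : q1 x
      · by_cases h2 : q2 x
        · have hdx : d.2 < x.2 := hd x (by simp) h1 h2
          rw [if_pos h1, headD_filter_insertBy q2 x s d hpair h2 hdx]
          simp only [List.foldl_cons, List.foldl_nil, h1, h2, Bool.true_and, Bool.and_true]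
          simp only [decide_eq_true_eq]
        · rw [if_pos h1, filter_insertBy_of_neg q2 _ x h2]
          simp [h2]
      · rw [if_neg h1]
        simp [h1]

-- every counter item has a positive count
lemma counter_items_pos (subs : List String) :
    ∀ x ∈ (PySem.Dict.counter subs).items, (0 : Int) < x.2 := by
  intro x hx
  rw [PySem.Dict.items_counter] at hx
  rcases List.mem_map.mp hx with ⟨k, hk, rfl⟩
  have hmem : k ∈ subs := (PySem.Set.mem_ofList _ _).mp hk
  have hc : 0 < subs.count k := List.count_pos_iff.mpr hmem
  show (0 : Int) < ((subs.count k : Nat) : Int)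
  exact_mod_cast hc

-- a fold carrying an explicit integer counter is a fold over enumerate
lemma foldl_pair_counter_eq_enumerate {α β : Type} (F : β → Int × α → β) :
    ∀ (l : List α) (init : β) (s : Int),
    (l.foldl (fun st e => (F st.1 (st.2, e), st.2 + 1)) (init, s)).1
      = (PySem.List.enumerate l s).foldl F init := by
  intro l
  induction l with
  | nil => intro init s; simp [PySem.List.enumerate_nil]
  | cons x xs ih =>
      intro init s
      simp only [List.foldl_cons, PySem.List.enumerate_cons]
      exact ih _ _

-- B's first-occurrence-guarded scan over enumerate(l) visits exactly the distinct
-- elements of l in first-appearance order, i.e. it is a fold over set(l)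
lemma foldl_enumerate_firstocc {β : Type} (g : β → String → β) :
    ∀ (l : List String) (init : β),
    (PySem.List.enumerate l 0).foldl
      (fun b p => if PySem.List.index? l p.2 = some p.1.toNat then g b p.2 else b) init
    = (PySem.Set.ofList l).foldl g init := by
  intro l
  induction l using List.reverseRecOn with
  | nil => intro init; simp [PySem.List.enumerate, PySem.Set.ofList]
  | append_singleton l' x ih =>
      intro init
      rw [PySem.List.enumerate_append, List.foldl_append, PySem.Set.ofList_append_singleton]
      -- on the old pairs the guard w.r.t. l' ++ [x] agrees with the guard w.r.t. l'
      have hcongr : (PySem.List.enumerate l' 0).foldl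
          (fun b p => if PySem.List.index? (l' ++ [x]) p.2 = some p.1.toNat then g b p.2 else b) init
          = (PySem.List.enumerate l' 0).foldl
          (fun b p => if PySem.List.index? l' p.2 = some p.1.toNat then g b p.2 else b) init := by
        apply PySem.List.foldl_congr_mem
        intro acc p hp
        rcases (PySem.List.mem_enumerate_iff _ _ _).mp hp with ⟨k, hk, rfl⟩
        have hmem : l'[k] ∈ l' := List.getElem_mem hk
        rw [PySem.List.index?_append_of_mem _ hmem]
      rw [hcongr, ih init]
      -- the appended pair is ((l'.length : Int), x)
      by_cases hx : x ∈ l'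
      · -- not a first occurrence: index? points strictly before l'.length
        rw [PySem.Set.add_of_mem ((PySem.Set.mem_ofList _ _).mpr hx)]
        rcases (PySem.List.index?_isSome_iff l' x).mpr hx |> Option.isSome_iff_exists.mp with ⟨k, hk⟩
        have hklt : k < l'.length := by
          rcases PySem.List.getElem_of_index?_eq_some hk with ⟨h, _, _⟩
          exact h
        have hidx : PySem.List.index? (l' ++ [x]) x = some k := by
          rw [PySem.List.index?_append_of_mem _ hx, hk]
        simp only [PySem.List.enumerate_cons, PySem.List.enumerate_nil, List.foldl_cons,
          List.foldl_nil]
        rw [hidx, if_neg]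
        intro h
        have hkk : k = ((0 : Int) + (l'.length : Int)).toNat := Option.some.inj h
        simp at hkk
        omega
      · rw [PySem.Set.add_of_not_mem (fun h => hx ((PySem.Set.mem_ofList _ _).mp h)), List.foldl_append]
        have hidx : PySem.List.index? (l' ++ [x]) x = some l'.length :=
          PySem.List.index?_append_singleton_self l' x hx
        simp only [PySem.List.enumerate_cons, PySem.List.enumerate_nil, List.foldl_cons,
          List.foldl_nil]
        rw [hidx, if_pos (by simp)]

-- ===== VERDICT (by name: the statement is the Claim_ definition above) =====
set_option maxHeartbeats 1600000 in
theorem ngram_repeat_spec : Claim_equal_ngram_repeat := by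
  intro text L K _
  unfold Spec_ngram_repeat ngram_repeat ngram_repeat_alt
  set subs := (PySem.List.pyRange 0 (PySem.Str.len text - L + 1) 1).map
      (fun i => PySem.Str.slice text (some i) (some (i + L))) with hsubs
  simp only []
  rw [headD_sorted_eq_foldl (fun p => decide (K ≤ p.2))
        (fun p => decide ((3 : Int) < PySem.Set.len (PySem.Set.ofList p.1.toList)))
        (PySem.Dict.counter subs).items ("", 0)
        (by intro x hx _ _; exact counter_items_pos subs x hx)]
  rw [PySem.Dict.items_counter, List.foldl_map]
  have hB1 : (List.foldl
        (fun (st : (String × Int) × Int) (s : String) =>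
          (if PySem.List.index? subs s = some st.2.toNat then
              if decide (K ≤ (PySem.List.count subs s : Int)) && decide (st.1.2 < (PySem.List.count subs s : Int))
                  && decide ((3 : Int) < PySem.Set.len (PySem.Set.ofList s.toList))
                then (s, (PySem.List.count subs s : Int)) else st.1
            else st.1,
            st.2 + 1))
        (("", 0), (0 : Int)) subs).1
      = (PySem.List.enumerate subs 0).foldl
          (fun b p => if PySem.List.index? subs p.2 = some p.1.toNat then
              (if decide (K ≤ (PySem.List.count subs p.2 : Int)) && decide (b.2 < (PySem.List.count subs p.2 : Int))
                  && decide ((3 : Int) < PySem.Set.len (PySem.Set.ofList p.2.toList))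
                then (p.2, (PySem.List.count subs p.2 : Int)) else b) else b) ("", 0) :=
    foldl_pair_counter_eq_enumerate
      (fun b p => if PySem.List.index? subs p.2 = some p.1.toNat then
          (if decide (K ≤ (PySem.List.count subs p.2 : Int)) && decide (b.2 < (PySem.List.count subs p.2 : Int))
              && decide ((3 : Int) < PySem.Set.len (PySem.Set.ofList p.2.toList))
            then (p.2, (PySem.List.count subs p.2 : Int)) else b) else b)
      subs ("", 0) 0
  have hB2 : (PySem.List.enumerate subs 0).foldl
          (fun b p => if PySem.List.index? subs p.2 = some p.1.toNat then
              (if decide (K ≤ (PySem.List.count subs p.2 : Int)) && decide (b.2 < (PySem.List.count subs p.2 : Int))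
                  && decide ((3 : Int) < PySem.Set.len (PySem.Set.ofList p.2.toList))
                then (p.2, (PySem.List.count subs p.2 : Int)) else b) else b) ("", 0)
      = (PySem.Set.ofList subs).foldl
          (fun b s => if decide (K ≤ (PySem.List.count subs s : Int)) && decide (b.2 < (PySem.List.count subs s : Int))
                  && decide ((3 : Int) < PySem.Set.len (PySem.Set.ofList s.toList))
                then (s, (PySem.List.count subs s : Int)) else b) ("", 0) :=
    foldl_enumerate_firstocc
      (fun b s => if decide (K ≤ (PySem.List.count subs s : Int)) && decide (b.2 < (PySem.List.count subs s : Int))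
              && decide ((3 : Int) < PySem.Set.len (PySem.Set.ofList s.toList))
            then (s, (PySem.List.count subs s : Int)) else b)
      subs ("", 0)
  rw [hB1, hB2]
  apply PySem.List.foldl_congr_mem
  intro acc p _
  simp [PySem.List.count_eq, Bool.and_assoc]
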